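-- pv_equiv track=rewrite | github.com/ravish-oo/opoch-toe-arc-agi | src/sviews.py | minimal_col_period
-- ===== SOURCE A (Python) =====
-- from typing import List, Tuple, Dict, Callable, Optional, Any
--
-- IntGrid = List[List[int]]
--
-- def minimal_col_period(G: IntGrid) -> Tuple[int, List[int]]:
--     """
--     Compute minimal period per column and their gcd.
--
--     Args:
--         G: Grid to analyze
--
--     Returns:
--         (gcd_col, per_col_periods)
--         where gcd_col is gcd of all column periods,
--         and per_col_periods[j] is minimal period of column j
--
--     Algorithm:
--         For each column j:
--             - Check divisors of H in ascending order
--             - Find smallest p where G[i,j] = G[(i+p)%H,j] for all i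
--         Return gcd of all column periods
--     """
--     H = len(G)
--     W = len(G[0]) if H > 0 else 0
--
--     if H == 0:
--         return (1, [])
--
--     # Compute divisors of H
--     divisors = []
--     for p in range(1, H + 1):
--         if H % p == 0:
--             divisors.append(p)
--
--     per_col_periods = []
--
--     for j in range(W):
--         col_period = H  # Default: full height
--
--         for p in divisors:
--             # Check if period p works for this column
--             is_period = True
--             for i in range(H):
--                 i_shifted = (i + p) % H
--                 if G[i][j] != G[i_shifted][j]:
--                     is_period = False
--                     break
--
--             if is_period:
--                 col_period = p
--                 break  # Found minimal period
--
--         per_col_periods.append(col_period)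
--
--     # Compute gcd of all column periods
--     import math
--     gcd_col = per_col_periods[0] if per_col_periods else 1
--     for p in per_col_periods[1:]:
--         gcd_col = math.gcd(gcd_col, p)
--
--     return (gcd_col, per_col_periods)
-- ===== SOURCE B (Python) =====
-- from math import gcd
-- from typing import List, Tuple
--
-- IntGrid = List[List[int]]
--
--
-- def _col_period(col, H):
--     # minimal cyclic period = gcd of all rotation amounts fixing the column
--     # (the fixing shifts form a subgroup of Z_H, generated by their gcd)
--     g = H
--     for s in range(1, H):
--         if col[s:] + col[:s] == col:
--             g = gcd(g, s)
--     return g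
--
--
-- def minimal_col_period(G: IntGrid) -> Tuple[int, List[int]]:
--     H = len(G)
--     if H == 0:
--         return (1, [])
--     W = len(G[0])
--     per = [_col_period([G[i][j] for i in range(H)], H) for j in range(W)]
--     overall = 0
--     for p in per:
--         overall = gcd(overall, p)
--     return (overall if per else 1, per)
-- ===== Notes on version B (the rewrite author's own statement) =====
-- stated objective: alternative
-- what changed: A scans the divisors of H in ascending order with a triple nested loop and breaks; B instead takes, per column, the gcd of all rotation amounts that fix the column (the fixing shifts form a subgroup of Z_H, so that gcd is exactly the minimal divisor period), built from a transposed column list and slice-based rotation tests.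
import Mathlib
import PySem

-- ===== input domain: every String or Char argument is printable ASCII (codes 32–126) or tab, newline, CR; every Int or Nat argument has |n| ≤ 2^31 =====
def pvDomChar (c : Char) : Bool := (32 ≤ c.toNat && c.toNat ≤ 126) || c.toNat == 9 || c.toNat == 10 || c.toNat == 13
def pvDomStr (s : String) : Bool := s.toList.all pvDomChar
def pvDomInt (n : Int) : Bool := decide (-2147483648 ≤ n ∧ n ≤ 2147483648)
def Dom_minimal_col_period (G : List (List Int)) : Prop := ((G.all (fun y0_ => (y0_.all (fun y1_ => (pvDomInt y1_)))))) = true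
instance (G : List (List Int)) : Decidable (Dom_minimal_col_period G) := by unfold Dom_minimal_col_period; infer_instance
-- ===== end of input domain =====

-- B replaces A's scan of the divisors of H (with a triple nested loop and breaks) by the
-- gcd of all rotation amounts that fix a column (the fixing shifts form a subgroup of Z_H);
-- objective: alternative (genuinely different algorithm, similar cost).

-- ===== PORT A =====
def pvAGet (G : List (List Int)) (i j : Int) : Int :=
  PySem.List.pyGetD (PySem.List.pyGetD G i []) j 0

-- inner 'for i in range(H): … break' loop of A (break = stop at first mismatch)
def pvAIsPeriod (G : List (List Int)) (H j p : Int) : List Int → Bool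
  | [] => true
  | i :: rest =>
    if pvAGet G i j ≠ pvAGet G (PySem.Int.mod (i + p) H) j then false
    else pvAIsPeriod G H j p rest

-- 'for p in divisors: if is_period: col_period = p; break' (default H)
def pvAFindPeriod (G : List (List Int)) (H j : Int) : List Int → Int
  | [] => H
  | p :: rest =>
    if pvAIsPeriod G H j p (PySem.List.pyRange 0 H 1) then p
    else pvAFindPeriod G H j rest

def minimal_col_period (G : List (List Int)) : Int × List Int :=
  let H : Int := (G.length : Int)
  let W : Int := if H > 0 then ((PySem.List.pyGetD G 0 []).length : Int) else 0
  if H = 0 then (1, [])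
  else
    let divisors : List Int :=
      (PySem.List.pyRange 1 (H + 1) 1).foldl
        (fun acc p => if PySem.Int.mod H p = 0 then acc ++ [p] else acc) []
    let per : List Int :=
      (PySem.List.pyRange 0 W 1).foldl
        (fun acc j => acc ++ [pvAFindPeriod G H j divisors]) []
    let gcd0 : Int := match per with | [] => 1 | x :: _ => x
    let g : Int :=
      (PySem.List.slice per (some 1) none).foldl (fun a b => ((Int.gcd a b : Nat) : Int)) gcd0
    (g, per)

-- ===== PORT B =====
-- Source B _col_period: gcd over all rotation amounts s with col[s:]+col[:s] == col
def pvBColPeriod (col : List Int) (H : Int) : Int :=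
  (PySem.List.pyRange 1 H 1).foldl
    (fun g s =>
      if PySem.List.slice col (some s) none ++ PySem.List.slice col none (some s) = col
      then ((Int.gcd g s : Nat) : Int) else g) H

def minimal_col_period_alt (G : List (List Int)) : Int × List Int :=
  let H : Int := (G.length : Int)
  if H = 0 then (1, [])
  else
    let W : Int := ((PySem.List.pyGetD G 0 []).length : Int)
    let per : List Int :=
      (PySem.List.pyRange 0 W 1).map (fun j =>
        pvBColPeriod ((PySem.List.pyRange 0 H 1).map (fun i =>
          PySem.List.pyGetD (PySem.List.pyGetD G i []) j 0)) H)
    let overall : Int := per.foldl (fun a b => ((Int.gcd a b : Nat) : Int)) 0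
    (if per = [] then 1 else overall, per)

-- ===== PRECONDITION & SPEC =====
-- Pre_ excludes ragged grids in which some row is shorter than row 0: there both the
-- Python A and the Python B raise IndexError while indexing that row.
def Pre_minimal_col_period (G : List (List Int)) : Prop :=
  ∀ row ∈ G, (G.headD []).length ≤ row.length
instance (G : List (List Int)) : Decidable (Pre_minimal_col_period G) := by
  unfold Pre_minimal_col_period; infer_instance

def pvWitness_minimal_col_period : List (List Int) := [[1, 2], [3, 4]]

def Spec_minimal_col_period (G : List (List Int)) (out : Int × List Int) : Prop := out = minimal_col_period_alt G
instance (G : List (List Int)) (out : Int × List Int) : Decidable (Spec_minimal_col_period G out) := by unfold Spec_minimal_col_period; infer_instance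

-- ===== CLAIM (what is proved, stated in full; the proofs are below) =====
def Claim_equal_minimal_col_period : Prop := ∀ (G : List (List Int)), Dom_minimal_col_period G → Pre_minimal_col_period G → Spec_minimal_col_period G (minimal_col_period G)

-- ===== LEMMAS AND PROOFS =====

-- the column j of G, as both loops read it
def pvCol (G : List (List Int)) (j : ℕ) : List Int := G.map (fun row => row.getD j 0)

lemma pvCol_length (G : List (List Int)) (j : ℕ) : (pvCol G j).length = G.length := by
  simp [pvCol]

lemma pvFixEx (c : List Int) : ∃ s, 0 < s ∧ c.rotate s = c := by
  rcases Nat.eq_zero_or_pos c.length with h | h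
  · exact ⟨1, Nat.one_pos, by simp [List.eq_nil_of_length_eq_zero h]⟩
  · exact ⟨c.length, h, List.rotate_length c⟩

-- the minimal positive rotation amount fixing c
def pvM (c : List Int) : ℕ := Nat.find (pvFixEx c)

lemma pvM_pos (c : List Int) : 0 < pvM c := (Nat.find_spec (pvFixEx c)).1

lemma pvM_fix (c : List Int) : c.rotate (pvM c) = c := (Nat.find_spec (pvFixEx c)).2

lemma pvM_min (c : List Int) {s : ℕ} (hs : 0 < s) (h : c.rotate s = c) : pvM c ≤ s :=
  Nat.find_min' (pvFixEx c) ⟨hs, h⟩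

lemma pv_rot_cancel (c : List Int) (a d : ℕ) (ha : c.rotate a = c)
    (had : c.rotate (a + d) = c) : c.rotate d = c := by
  have h1 : (c.rotate d).rotate a = c.rotate a := by
    rw [List.rotate_rotate, Nat.add_comm d a, had, ha]
  exact List.rotate_injective a h1

lemma pvM_dvd (c : List Int) : ∀ s : ℕ, c.rotate s = c → pvM c ∣ s := by
  intro s
  induction s using Nat.strong_induction_on with
  | _ s ih =>
    intro hs
    rcases Nat.eq_zero_or_pos s with rfl | hpos
    · exact dvd_zero _
    · have hle : pvM c ≤ s := pvM_min c hpos hs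
      rcases Nat.eq_or_lt_of_le hle with heq | hlt
      · exact heq ▸ dvd_refl _
      · have hsub : c.rotate (s - pvM c) = c := by
          apply pv_rot_cancel c (pvM c) (s - pvM c) (pvM_fix c)
          rwa [Nat.add_sub_cancel' hle]
        have := ih (s - pvM c) (by have := pvM_pos c; omega) hsub
        have h2 : pvM c ∣ (s - pvM c) + pvM c := Dvd.dvd.add this (dvd_refl _)
        rwa [Nat.sub_add_cancel hle] at h2

lemma pv_rot_mul (c : List Int) (k t : ℕ) (h : c.rotate k = c) : c.rotate (t * k) = c := by
  induction t with
  | zero => simp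
  | succ t iht => rw [Nat.succ_mul, ← List.rotate_rotate, iht, h]

lemma pv_fix_iff (c : List Int) (s : ℕ) : c.rotate s = c ↔ pvM c ∣ s := by
  constructor
  · exact pvM_dvd c s
  · rintro ⟨t, rfl⟩
    rw [Nat.mul_comm]
    exact pv_rot_mul c (pvM c) t (pvM_fix c)

lemma pvM_dvd_len (c : List Int) : pvM c ∣ c.length :=
  (pv_fix_iff c c.length).1 (List.rotate_length c)

-- rotation as a pointwise condition (how A's index loop reads it)
lemma pv_rotate_iff_pointwise (c : List Int) (p : ℕ) (hc : c ≠ []) :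
    c.rotate p = c ↔ ∀ i < c.length, c.getD i 0 = c.getD ((i + p) % c.length) 0 := by
  have hlen : 0 < c.length := List.length_pos_iff.mpr hc
  constructor
  · intro h i hi
    have hm : (i + p) % c.length < c.length := Nat.mod_lt _ hlen
    have h2 : (c.rotate p).getD i 0 = c.getD ((i + p) % c.length) 0 := by
      rw [List.getD_eq_getElem _ 0 (by simpa using hi), List.getD_eq_getElem _ 0 hm]
      exact List.getElem_rotate c p i (by simpa using hi)
    rw [h] at h2
    exact h2
  · intro h
    apply List.ext_getElem (by simp)
    intro i h1 h2
    rw [List.getElem_rotate]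
    have hm : (i + p) % c.length < c.length := Nat.mod_lt _ hlen
    have h3 := h i h2
    rw [List.getD_eq_getElem _ 0 h2, List.getD_eq_getElem _ 0 hm] at h3
    exact h3.symm

-- ---- A side ----

lemma pvAGet_nat (G : List (List Int)) (i j : ℕ) :
    pvAGet G (i : Int) (j : Int) = (pvCol G j).getD i 0 := by
  unfold pvAGet pvCol
  rw [PySem.List.pyGetD_natCast, PySem.List.pyGetD_natCast]
  by_cases hi : i < G.length
  · rw [List.getD_eq_getElem G [] hi,
      List.getD_eq_getElem (G.map fun row => row.getD j 0) 0 (by simpa using hi),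
      List.getElem_map]
  · have hle : G.length ≤ i := by omega
    rw [List.getD_eq_default G [] hle,
      List.getD_eq_default (G.map fun row => row.getD j 0) 0 (by simpa using hle)]
    simp

lemma pvAIsPeriod_iff (G : List (List Int)) (H j p : Int) (l : List Int) :
    pvAIsPeriod G H j p l = true ↔
      ∀ i ∈ l, pvAGet G i j = pvAGet G (PySem.Int.mod (i + p) H) j := by
  induction l with
  | nil => simp [pvAIsPeriod]
  | cons x xs ih =>
    by_cases h : pvAGet G x j = pvAGet G (PySem.Int.mod (x + p) H) j
    · simp [pvAIsPeriod, h, ih]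
    · simp [pvAIsPeriod, h]

-- A's is_period check is exactly "rotating column j by p fixes it"
lemma pvAIsPeriod_rotate (G : List (List Int)) (hG : G ≠ []) (j p : ℕ) :
    (pvAIsPeriod G (G.length : Int) (j : Int) (p : Int)
      (PySem.List.pyRange 0 (G.length : Int) 1) = true) ↔ (pvCol G j).rotate p = pvCol G j := by
  have hcne : pvCol G j ≠ [] := by
    simpa [pvCol] using hG
  rw [pvAIsPeriod_iff, pv_rotate_iff_pointwise _ p hcne]
  simp only [pvCol_length]
  constructor
  · intro h i hi
    have hmem : ((i : Nat) : Int) ∈ PySem.List.pyRange 0 (G.length : Int) 1 := by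
      rw [PySem.List.mem_pyRange_one]
      constructor
      · positivity
      · exact_mod_cast hi
    have h2 := h (i : Int) hmem
    have hmod : PySem.Int.mod ((i : Int) + (p : Int)) ((G.length : Nat) : Int)
        = (((i + p) % G.length : ℕ) : Int) := by
      rw [← Nat.cast_add, PySem.Int.mod_natCast]
    rw [hmod, pvAGet_nat, pvAGet_nat] at h2
    exact h2
  · intro h i hmem
    rw [PySem.List.mem_pyRange_one] at hmem
    obtain ⟨h0, h1⟩ := hmem
    obtain ⟨iN, rfl⟩ : ∃ iN : ℕ, (iN : Int) = i := ⟨i.toNat, Int.toNat_of_nonneg h0⟩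
    have hiN : iN < G.length := by exact_mod_cast h1
    have hmod : PySem.Int.mod ((iN : Int) + (p : Int)) ((G.length : Nat) : Int)
        = (((iN + p) % G.length : ℕ) : Int) := by
      rw [← Nat.cast_add, PySem.Int.mod_natCast]
    rw [hmod, pvAGet_nat, pvAGet_nat]
    exact h iN hiN

lemma pvAFind_eq (G : List (List Int)) (H j : Int) (m : ℕ) (_hm : 0 < m) (l : List Int)
    (hsort : l.Pairwise (· < ·)) (hmem : ((m : Nat) : Int) ∈ l)
    (hiff : ∀ q ∈ l, (pvAIsPeriod G H j q (PySem.List.pyRange 0 H 1) = true ↔ ((m : Nat) : Int) ∣ q))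
    (hposl : ∀ q ∈ l, 0 < q) :
    pvAFindPeriod G H j l = ((m : Nat) : Int) := by
  induction l with
  | nil => simp at hmem
  | cons q rest ih =>
    rcases List.pairwise_cons.mp hsort with ⟨hlt, hrest⟩
    by_cases hq : pvAIsPeriod G H j q (PySem.List.pyRange 0 H 1) = true
    · have hdvd : ((m : Nat) : Int) ∣ q := (hiff q (by simp)).1 hq
      have hqpos : 0 < q := hposl q (by simp)
      have hle : ((m : Nat) : Int) ≤ q := Int.le_of_dvd hqpos hdvd
      have heq : q = ((m : Nat) : Int) := by
        rcases List.mem_cons.mp hmem with h | h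
        · omega
        · have := hlt _ h; omega
      simp only [pvAFindPeriod, if_pos hq]
      exact heq
    · have hmem' : ((m : Nat) : Int) ∈ rest := by
        rcases List.mem_cons.mp hmem with h' | h'
        · exact absurd ((hiff q (by simp)).2 (h' ▸ dvd_refl ((m : Nat) : Int))) hq
        · exact h'
      simp only [pvAFindPeriod]
      rw [if_neg hq]
      exact ih hrest hmem' (fun r hr => hiff r (List.mem_cons_of_mem _ hr))
        (fun r hr => hposl r (List.mem_cons_of_mem _ hr))

-- ---- B side fold lemmas ----

lemma pv_gcd_eq_left (M s : Int) (h : M ∣ s) (hM : 0 < M) : ((Int.gcd M s : Nat) : Int) = M := by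
  have h1 : M.natAbs ∣ s.natAbs := Int.natAbs_dvd_natAbs.mpr h
  have h2 : Int.gcd M s = M.natAbs := Nat.gcd_eq_left h1
  rw [h2, Int.natAbs_of_nonneg (le_of_lt hM)]

lemma pv_gcd_pos (g s : Int) (hg : 0 < g) : 0 < ((Int.gcd g s : Nat) : Int) := by
  have : Int.gcd g s ≠ 0 := by
    intro h
    rcases Int.gcd_eq_zero_iff.mp h with ⟨h1, h2⟩
    omega
  exact_mod_cast Nat.pos_of_ne_zero this

lemma pv_foldl_gcd_fixed (M : Int) (hM : 0 < M) (l : List Int) (P : Int → Prop)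
    [DecidablePred P] (hc : ∀ s ∈ l, P s → M ∣ s) :
    l.foldl (fun g s => if P s then ((Int.gcd g s : Nat) : Int) else g) M = M := by
  induction l with
  | nil => rfl
  | cons s rest ih =>
    by_cases h : P s
    · have hdvd : M ∣ s := hc s (by simp) h
      rw [List.foldl_cons, if_pos h, pv_gcd_eq_left M s hdvd hM]
      exact ih (fun t ht => hc t (List.mem_cons_of_mem _ ht))
    · rw [List.foldl_cons, if_neg h]
      exact ih (fun t ht => hc t (List.mem_cons_of_mem _ ht))

lemma pv_foldl_gcd_hit (M : Int) (hM : 0 < M) (l : List Int) (P : Int → Prop)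
    [DecidablePred P] (hc : ∀ s ∈ l, P s → M ∣ s) (g0 : Int) (h0 : M ∣ g0) (hg : 0 < g0)
    (hmem : M ∈ l) (hcm : P M) :
    l.foldl (fun g s => if P s then ((Int.gcd g s : Nat) : Int) else g) g0 = M := by
  induction l generalizing g0 with
  | nil => simp at hmem
  | cons s rest ih =>
    by_cases h : P s
    · have hdvd : M ∣ s := hc s (by simp) h
      have hgpos : 0 < ((Int.gcd g0 s : Nat) : Int) := pv_gcd_pos g0 s hg
      have hgdvd : M ∣ ((Int.gcd g0 s : Nat) : Int) := by
        have h1 : M.natAbs ∣ Int.gcd g0 s :=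
          Nat.dvd_gcd (Int.natAbs_dvd_natAbs.mpr h0) (Int.natAbs_dvd_natAbs.mpr hdvd)
        have h2 : ((M.natAbs : Nat) : Int) ∣ ((Int.gcd g0 s : Nat) : Int) :=
          Int.natCast_dvd_natCast.mpr h1
        rwa [Int.natAbs_dvd] at h2
      by_cases hsM : s = M
      · subst hsM
        have hgM : ((Int.gcd g0 s : Nat) : Int) = s := by
          rw [Int.gcd_comm]
          exact pv_gcd_eq_left s g0 h0 hM
        rw [List.foldl_cons, if_pos h, hgM]
        exact pv_foldl_gcd_fixed s hM rest P (fun t ht => hc t (List.mem_cons_of_mem _ ht))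
      · have hmem' : M ∈ rest := by
          rcases List.mem_cons.mp hmem with h' | h'
          · exact absurd h'.symm hsM
          · exact h'
        rw [List.foldl_cons, if_pos h]
        exact ih (fun t ht => hc t (List.mem_cons_of_mem _ ht)) _ hgdvd hgpos hmem'
    · have hsM : s ≠ M := fun h' => h (h' ▸ hcm)
      have hmem' : M ∈ rest := by
        rcases List.mem_cons.mp hmem with h' | h'
        · exact absurd h'.symm hsM
        · exact h'
      rw [List.foldl_cons, if_neg h]
      exact ih (fun t ht => hc t (List.mem_cons_of_mem _ ht)) g0 h0 hg hmem'

lemma pv_foldl_gcd_none (l : List Int) (P : Int → Prop) [DecidablePred P] (g0 : Int)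
    (hc : ∀ s ∈ l, ¬ P s) :
    l.foldl (fun g s => if P s then ((Int.gcd g s : Nat) : Int) else g) g0 = g0 := by
  induction l generalizing g0 with
  | nil => rfl
  | cons s rest ih =>
    rw [List.foldl_cons, if_neg (hc s (by simp))]
    exact ih g0 (fun t ht => hc t (List.mem_cons_of_mem _ ht))

-- B's per-column value equals the minimal fixing rotation
lemma pvBColPeriod_eq (c : List Int) (hc : c ≠ []) :
    pvBColPeriod c (c.length : Int) = ((pvM c : Nat) : Int) := by
  have hn : 0 < c.length := List.length_pos_iff.mpr hc
  have hmpos := pvM_pos c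
  have hmlen : pvM c ≤ c.length := Nat.le_of_dvd hn (pvM_dvd_len c)
  unfold pvBColPeriod
  have hcongr : (PySem.List.pyRange 1 (c.length : Int) 1).foldl
      (fun g s => if PySem.List.slice c (some s) none ++ PySem.List.slice c none (some s) = c
        then ((Int.gcd g s : Nat) : Int) else g) (c.length : Int)
    = (PySem.List.pyRange 1 (c.length : Int) 1).foldl
      (fun g s => if ((pvM c : Nat) : Int) ∣ s then ((Int.gcd g s : Nat) : Int) else g)
        (c.length : Int) := by
    apply PySem.List.foldl_congr_mem
    intro g s hs
    rw [PySem.List.mem_pyRange_one] at hs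
    obtain ⟨h1, h2⟩ := hs
    obtain ⟨sN, rfl⟩ : ∃ sN : ℕ, (sN : Int) = s := ⟨s.toNat, Int.toNat_of_nonneg (by omega)⟩
    have hsN : sN ≤ c.length := by exact_mod_cast le_of_lt h2
    apply if_congr _ rfl rfl
    rw [PySem.List.slice_from_natCast, PySem.List.slice_to_natCast,
      ← List.rotate_eq_drop_append_take hsN, pv_fix_iff]
    exact Int.natCast_dvd_natCast.symm
  rw [hcongr]
  by_cases hcase : pvM c = c.length
  · rw [pv_foldl_gcd_none]
    · rw [hcase]
    · intro s hs
      rw [PySem.List.mem_pyRange_one] at hs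
      obtain ⟨h1, h2⟩ := hs
      intro hdvd
      have hle := Int.le_of_dvd (by omega) hdvd
      rw [hcase] at hle
      omega
  · have hlt : pvM c < c.length := lt_of_le_of_ne hmlen hcase
    apply pv_foldl_gcd_hit
    · exact_mod_cast hmpos
    · intro s hs h
      exact h
    · exact Int.natCast_dvd_natCast.mpr (pvM_dvd_len c)
    · exact_mod_cast hn
    · rw [PySem.List.mem_pyRange_one]
      constructor
      · exact_mod_cast hmpos
      · exact_mod_cast hlt
    · exact dvd_refl _

-- A's first fixing divisor equals the minimal fixing rotation
lemma pv_find_eq_M (G : List (List Int)) (hG : G ≠ []) (j : ℕ) :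
    pvAFindPeriod G (G.length : Int) (j : Int)
      ((PySem.List.pyRange 1 ((G.length : Int) + 1) 1).foldl
        (fun acc p => if PySem.Int.mod (G.length : Int) p = 0 then acc ++ [p] else acc) [])
    = ((pvM (pvCol G j) : Nat) : Int) := by
  have hn : 0 < G.length := List.length_pos_iff.mpr hG
  have hmpos := pvM_pos (pvCol G j)
  have hmdvd : pvM (pvCol G j) ∣ G.length := by
    have h := pvM_dvd_len (pvCol G j)
    rwa [pvCol_length] at h
  have hmle : pvM (pvCol G j) ≤ G.length := Nat.le_of_dvd hn hmdvd
  rw [PySem.List.foldl_append_ite_eq_filter, List.nil_append]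
  apply pvAFind_eq G _ _ (pvM (pvCol G j)) hmpos
  · exact (PySem.List.pairwise_lt_pyRange_one _ _).filter _
  · rw [List.mem_filter, PySem.List.mem_pyRange_one]
    refine ⟨⟨by exact_mod_cast hmpos, by exact_mod_cast Nat.lt_succ_of_le hmle⟩, ?_⟩
    rw [decide_eq_true_eq, PySem.Int.mod_natCast]
    obtain ⟨k, hk⟩ := hmdvd
    rw [hk]
    simp [Nat.mul_mod_right]
  · intro q hq
    rw [List.mem_filter, PySem.List.mem_pyRange_one] at hq
    obtain ⟨⟨h1, h2⟩, hq2⟩ := hq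
    obtain ⟨qN, rfl⟩ : ∃ qN : ℕ, (qN : Int) = q := ⟨q.toNat, Int.toNat_of_nonneg (by omega)⟩
    rw [pvAIsPeriod_rotate G hG j qN, pv_fix_iff]
    exact Int.natCast_dvd_natCast.symm
  · intro q hq
    rw [List.mem_filter, PySem.List.mem_pyRange_one] at hq
    omega

-- the column expression built by B's comprehension is pvCol
lemma pv_colexpr_eq (G : List (List Int)) (j : ℕ) :
    (PySem.List.pyRange 0 (G.length : Int) 1).map
      (fun i => PySem.List.pyGetD (PySem.List.pyGetD G i []) (j : Int) 0) = pvCol G j := by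
  rw [PySem.List.pyRange_one]
  simp only [Int.sub_zero, Int.toNat_natCast, List.map_map]
  apply List.ext_getElem (by simp [pvCol])
  intro i h1 h2
  simp only [List.getElem_map, List.getElem_range, Function.comp_apply, zero_add]
  have hA := pvAGet_nat G i j
  unfold pvAGet at hA
  rw [hA, List.getD_eq_getElem (pvCol G j) 0 h2]

lemma pv_gcd_fold_shift (x : Int) (rest : List Int) (hx : 0 ≤ x) :
    (x :: rest).foldl (fun a b => ((Int.gcd a b : Nat) : Int)) 0
      = rest.foldl (fun a b => ((Int.gcd a b : Nat) : Int)) x := by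
  rw [List.foldl_cons]
  congr 1
  rw [Int.gcd_zero_left, Int.natAbs_of_nonneg hx]

lemma pv_main (G : List (List Int)) : minimal_col_period G = minimal_col_period_alt G := by
  by_cases hG : G = []
  · subst hG; rfl
  · have hn : 0 < G.length := List.length_pos_iff.mpr hG
    have h0 : ¬((G.length : Nat) : Int) = 0 := by
      simp [hG]
    have hpos : ((G.length : Nat) : Int) > 0 := by exact_mod_cast hn
    unfold minimal_col_period minimal_col_period_alt
    simp only [if_neg h0, if_pos hpos]
    rw [PySem.List.foldl_append_singleton_eq_map, List.nil_append]
    have hper : (PySem.List.pyRange 0 ((PySem.List.pyGetD G 0 []).length : Int) 1).map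
        (fun j => pvAFindPeriod G (G.length : Int) j
          ((PySem.List.pyRange 1 ((G.length : Int) + 1) 1).foldl
            (fun acc p => if PySem.Int.mod (G.length : Int) p = 0 then acc ++ [p] else acc) []))
      = (PySem.List.pyRange 0 ((PySem.List.pyGetD G 0 []).length : Int) 1).map
        (fun j => pvBColPeriod ((PySem.List.pyRange 0 (G.length : Int) 1).map
          (fun i => PySem.List.pyGetD (PySem.List.pyGetD G i []) j 0)) (G.length : Int)) := by
      apply List.map_congr_left
      intro j hj
      rw [PySem.List.mem_pyRange_one] at hj
      obtain ⟨hj0, hj1⟩ := hj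
      obtain ⟨jN, rfl⟩ : ∃ jN : ℕ, (jN : Int) = j := ⟨j.toNat, Int.toNat_of_nonneg hj0⟩
      have hB : pvBColPeriod (pvCol G jN) ((G.length : Nat) : Int)
          = ((pvM (pvCol G jN) : Nat) : Int) := by
        have h := pvBColPeriod_eq (pvCol G jN) (by simpa [pvCol] using hG)
        rwa [pvCol_length] at h
      rw [pv_colexpr_eq G jN, hB]
      exact pv_find_eq_M G hG jN
    rw [hper]
    have hnn : ∀ x ∈ (PySem.List.pyRange 0 ((PySem.List.pyGetD G 0 []).length : Int) 1).map
        (fun j => pvBColPeriod ((PySem.List.pyRange 0 (G.length : Int) 1).map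
          (fun i => PySem.List.pyGetD (PySem.List.pyGetD G i []) j 0)) (G.length : Int)),
        0 ≤ x := by
      intro x hx
      rw [List.mem_map] at hx
      obtain ⟨j, hj, rfl⟩ := hx
      rw [PySem.List.mem_pyRange_one] at hj
      obtain ⟨hj0, hj1⟩ := hj
      obtain ⟨jN, rfl⟩ : ∃ jN : ℕ, (jN : Int) = j := ⟨j.toNat, Int.toNat_of_nonneg hj0⟩
      have hB : pvBColPeriod (pvCol G jN) ((G.length : Nat) : Int)
          = ((pvM (pvCol G jN) : Nat) : Int) := by
        have h := pvBColPeriod_eq (pvCol G jN) (by simpa [pvCol] using hG)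
        rwa [pvCol_length] at h
      rw [pv_colexpr_eq G jN, hB]
      positivity
    generalize hper2 : (PySem.List.pyRange 0 ((PySem.List.pyGetD G 0 []).length : Int) 1).map
        (fun j => pvBColPeriod ((PySem.List.pyRange 0 (G.length : Int) 1).map
          (fun i => PySem.List.pyGetD (PySem.List.pyGetD G i []) j 0)) (G.length : Int)) = per
        at hnn ⊢
    cases per with
    | nil => rfl
    | cons x rest =>
      have hx : 0 ≤ x := hnn x (List.mem_cons_self)
      rw [PySem.List.slice_from_one, List.tail_cons]
      rw [← pv_gcd_fold_shift x rest hx]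
      simp

-- ===== VERDICT (by name: the statement is the Claim_ definition above) =====
theorem minimal_col_period_spec : Claim_equal_minimal_col_period := by
  intro G _ _
  unfold Spec_minimal_col_period
  exact pv_main G
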